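-- pv_equiv track=rewrite | github.com/Dima3108/interpreting_launges | vs/PythonApplications/Lab1_task5.py | task_58
-- ===== SOURCE A (Python) =====
-- def task_58(array1):
--      '''Для введенного списка вывести количество элементов, которые могут
-- быть получены как сумма двух любых других элементов списка'''
--      count=0
--      i=0
--      while(i<len(array1)):
--           j=0
--           while(j<len(array1)):
--                t=0
--                while(t<len(array1)):
--                     if(i!=j and j!=t and t!=i):
--                          if(array1[i]==(array1[j]+array1[t])):
--                               count=count+1
--                     t=t+1
--                j=j+1
--           i=i+1
--      return count
-- ===== SOURCE B (Python) =====
-- def task_58(array1):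
--     # One pass builds a value counter; then for each ordered pair (j, t), j != t,
--     # the number of valid i with array1[i] == s is cnt[s] minus the collisions i==j, i==t.
--     cnt = {}
--     for x in array1:
--         cnt[x] = cnt.get(x, 0) + 1
--     total = 0
--     n = len(array1)
--     for j in range(n):
--         for t in range(n):
--             if t != j:
--                 s = array1[j] + array1[t]
--                 total += cnt.get(s, 0) - (array1[j] == s) - (array1[t] == s)
--     return total
-- ===== Notes on version B (the rewrite author's own statement) =====
-- stated objective: faster
-- what changed: Replaces the triple nested index loop with a value counter built once plus a double loop over ordered pairs (j,t): the count of matching third indices i is read off the counter and corrected for i=j/i=t collisions, dropping the innermost scan.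
import Mathlib
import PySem

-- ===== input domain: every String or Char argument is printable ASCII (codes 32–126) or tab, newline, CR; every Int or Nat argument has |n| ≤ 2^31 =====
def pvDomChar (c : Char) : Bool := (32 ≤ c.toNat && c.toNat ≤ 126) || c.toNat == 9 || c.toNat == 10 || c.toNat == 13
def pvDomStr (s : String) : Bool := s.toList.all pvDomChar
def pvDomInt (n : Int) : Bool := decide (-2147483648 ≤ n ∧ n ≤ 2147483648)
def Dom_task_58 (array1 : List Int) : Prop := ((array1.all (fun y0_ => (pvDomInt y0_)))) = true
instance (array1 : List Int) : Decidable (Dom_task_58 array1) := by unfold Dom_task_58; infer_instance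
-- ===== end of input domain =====

-- B replaces A's triple index loop by a value counter plus a double loop over ordered pairs (objective: faster, O(n^2) vs O(n^3)).

-- ===== PORT A =====
def task_58 (array1 : List Int) : Int :=
  (List.range array1.length).foldl (fun count i =>
    (List.range array1.length).foldl (fun count j =>
      (List.range array1.length).foldl (fun count t =>
        if i ≠ j ∧ j ≠ t ∧ t ≠ i then
          if array1.getD i 0 = array1.getD j 0 + array1.getD t 0 then count + 1 else count
        else count) count) count) 0

-- ===== PORT B =====
def task_58_alt (array1 : List Int) : Int :=
  let cnt := array1.foldl (fun d x => d.insert x (d.getD x 0 + 1)) PySem.Dict.empty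
  (List.range array1.length).foldl (fun total j =>
    (List.range array1.length).foldl (fun total t =>
      if t ≠ j then
        total + cnt.getD (array1.getD j 0 + array1.getD t 0) 0
          - (if array1.getD j 0 = array1.getD j 0 + array1.getD t 0 then 1 else 0)
          - (if array1.getD t 0 = array1.getD j 0 + array1.getD t 0 then 1 else 0)
      else total) total) 0

-- ===== PRECONDITION & SPEC =====
def Spec_task_58 (array1 : List Int) (out : Int) : Prop := out = task_58_alt array1
instance (array1 : List Int) (out : Int) : Decidable (Spec_task_58 array1 out) := by unfold Spec_task_58; infer_instance

-- ===== CLAIM (what is proved, stated in full; the proofs are below) =====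
def Claim_equal_task_58 : Prop := ∀ (array1 : List Int), Dom_task_58 array1 → Spec_task_58 array1 (task_58 array1)

-- ===== LEMMAS AND PROOFS =====

-- a foldl whose body adds f x to the accumulator is the starting value plus the sum
lemma pv_foldl_body {α : Type} (l : List α) (g : Int → α → Int) (f : α → Int)
    (h : ∀ c x, g c x = c + f x) : ∀ c : Int, l.foldl g c = c + (l.map f).sum := by
  induction l with
  | nil => simp
  | cons x l ih => intro c; simp [List.foldl_cons, h, ih, add_assoc]

lemma pv_sum_map_sub {α : Type} (l : List α) (f g : α → Int) :
    (l.map (fun x => f x - g x)).sum = (l.map f).sum - (l.map g).sum := by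
  induction l with
  | nil => simp
  | cons x l ih => simp [ih]; ring

lemma pv_sum_map_add {α : Type} (l : List α) (f g : α → Int) :
    (l.map (fun x => f x + g x)).sum = (l.map f).sum + (l.map g).sum := by
  induction l with
  | nil => simp
  | cons x l ih => simp [ih]; ring

lemma pv_sum_comm {α β : Type} (l : List α) (m : List β) (F : α → β → Int) :
    (l.map (fun x => (m.map (F x)).sum)).sum
      = (m.map (fun y => (l.map (fun x => F x y)).sum)).sum := by
  induction l with
  | nil => simp
  | cons x l ih =>
    simp only [List.map_cons, List.sum_cons, ih]
    rw [pv_sum_map_add]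

-- sum of an indicator at one index over range
lemma pv_sum_single (n j : ℕ) (f : ℕ → Int) :
    ((List.range n).map (fun i => if i = j then f i else 0)).sum
      = if j < n then f j else 0 := by
  induction n with
  | zero => simp
  | succ n ih =>
    rw [List.range_succ, List.map_append, List.sum_append, ih]
    simp only [List.map_cons, List.map_nil, List.sum_cons, List.sum_nil]
    by_cases he : n = j
    · subst he
      simp
    · by_cases hj : j < n
      · simp [hj, he, Nat.lt_succ_of_lt hj]
      · have h2 : ¬ j < n + 1 := by omega
        simp [hj, he, h2]

-- sum of the equality indicator over all indices is the count
lemma pv_sum_count (xs : List Int) (s : Int) :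
    ((List.range xs.length).map (fun i => if xs.getD i 0 = s then (1 : Int) else 0)).sum
      = (xs.count s : Int) := by
  induction xs with
  | nil => simp
  | cons x xs ih =>
    rw [List.length_cons, List.range_succ_eq_map]
    simp only [List.map_cons, List.map_map, Function.comp_def, List.getD_cons_succ,
      List.getD_cons_zero, List.sum_cons, ih, List.count_cons]
    by_cases he : x = s
    · simp [he]
      ring
    · simp [he]

-- the per-pair identity: for j,t < n the inner i-scan of A equals B's counter expression
lemma pv_inner (xs : List Int) (j t : ℕ) (hj : j < xs.length) (ht : t < xs.length) :
    ((List.range xs.length).map (fun i =>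
      if i ≠ j ∧ j ≠ t ∧ t ≠ i then
        (if xs.getD i 0 = xs.getD j 0 + xs.getD t 0 then (1 : Int) else 0)
      else 0)).sum
    = (if t ≠ j then
        (xs.count (xs.getD j 0 + xs.getD t 0) : Int)
          - (if xs.getD j 0 = xs.getD j 0 + xs.getD t 0 then 1 else 0)
          - (if xs.getD t 0 = xs.getD j 0 + xs.getD t 0 then 1 else 0)
      else 0) := by
  set s := xs.getD j 0 + xs.getD t 0 with hs
  by_cases hjt : t = j
  · subst hjt
    simp
  · have hjt' : j ≠ t := fun h => hjt h.symm
    have hpt : ∀ i, (if i ≠ j ∧ j ≠ t ∧ t ≠ i then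
          (if xs.getD i 0 = s then (1 : Int) else 0) else 0)
        = (if xs.getD i 0 = s then (1 : Int) else 0)
            - (if i = j then (if xs.getD i 0 = s then (1 : Int) else 0) else 0)
            - (if i = t then (if xs.getD i 0 = s then (1 : Int) else 0) else 0) := by
      intro i
      by_cases hij : i = j
      · subst hij
        simp [hjt', hjt]
      · by_cases hit : i = t
        · subst hit
          simp [hij]
        · have hc : i ≠ j ∧ j ≠ t ∧ t ≠ i := ⟨hij, hjt', fun h => hit h.symm⟩
          simp [hc, hit]
    calc ((List.range xs.length).map (fun i =>
            if i ≠ j ∧ j ≠ t ∧ t ≠ i then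
              (if xs.getD i 0 = s then (1 : Int) else 0) else 0)).sum
        = ((List.range xs.length).map (fun i =>
            ((if xs.getD i 0 = s then (1 : Int) else 0)
              - (if i = j then (if xs.getD i 0 = s then (1 : Int) else 0) else 0))
              - (if i = t then (if xs.getD i 0 = s then (1 : Int) else 0) else 0))).sum := by
          exact congrArg _ (List.map_congr_left (fun i _ => hpt i))
      _ = (xs.count s : Int)
            - (if xs.getD j 0 = s then (1 : Int) else 0)
            - (if xs.getD t 0 = s then (1 : Int) else 0) := by
          rw [pv_sum_map_sub, pv_sum_map_sub, pv_sum_single, pv_sum_single, pv_sum_count]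
          simp [hj, ht]
      _ = _ := by simp [hjt]

-- task_58 as a triple sum
lemma pv_A_sum (xs : List Int) :
    task_58 xs = ((List.range xs.length).map (fun i =>
      ((List.range xs.length).map (fun j =>
        ((List.range xs.length).map (fun t =>
          if i ≠ j ∧ j ≠ t ∧ t ≠ i then
            (if xs.getD i 0 = xs.getD j 0 + xs.getD t 0 then (1 : Int) else 0)
          else 0)).sum)).sum)).sum := by
  have h3 : ∀ (i j : ℕ) (c : Int),
      (List.range xs.length).foldl (fun count t =>
        if i ≠ j ∧ j ≠ t ∧ t ≠ i then
          if xs.getD i 0 = xs.getD j 0 + xs.getD t 0 then count + 1 else count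
        else count) c
      = c + ((List.range xs.length).map (fun t =>
          if i ≠ j ∧ j ≠ t ∧ t ≠ i then
            (if xs.getD i 0 = xs.getD j 0 + xs.getD t 0 then (1 : Int) else 0)
          else 0)).sum := by
    intro i j
    apply pv_foldl_body
    intro c t
    split_ifs <;> ring
  have h2 : ∀ (i : ℕ) (c : Int),
      (List.range xs.length).foldl (fun count j =>
        (List.range xs.length).foldl (fun count t =>
          if i ≠ j ∧ j ≠ t ∧ t ≠ i then
            if xs.getD i 0 = xs.getD j 0 + xs.getD t 0 then count + 1 else count
          else count) count) c
      = c + ((List.range xs.length).map (fun j =>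
          ((List.range xs.length).map (fun t =>
            if i ≠ j ∧ j ≠ t ∧ t ≠ i then
              (if xs.getD i 0 = xs.getD j 0 + xs.getD t 0 then (1 : Int) else 0)
            else 0)).sum)).sum := by
    intro i
    apply pv_foldl_body
    intro c j
    exact h3 i j c
  have h1 := pv_foldl_body (List.range xs.length) _ _ (fun c i => h2 i c) 0
  unfold task_58
  rw [h1, zero_add]

-- task_58_alt as a double sum over pairs
lemma pv_B_sum (xs : List Int) :
    task_58_alt xs = ((List.range xs.length).map (fun j =>
      ((List.range xs.length).map (fun t =>
        if t ≠ j then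
          (xs.count (xs.getD j 0 + xs.getD t 0) : Int)
            - (if xs.getD j 0 = xs.getD j 0 + xs.getD t 0 then 1 else 0)
            - (if xs.getD t 0 = xs.getD j 0 + xs.getD t 0 then 1 else 0)
        else 0)).sum)).sum := by
  have h2 : ∀ (j : ℕ) (c : Int),
      (List.range xs.length).foldl (fun total t =>
        if t ≠ j then
          total + (PySem.Dict.counter xs).getD (xs.getD j 0 + xs.getD t 0) 0
            - (if xs.getD j 0 = xs.getD j 0 + xs.getD t 0 then 1 else 0)
            - (if xs.getD t 0 = xs.getD j 0 + xs.getD t 0 then 1 else 0)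
        else total) c
      = c + ((List.range xs.length).map (fun t =>
          if t ≠ j then
            (xs.count (xs.getD j 0 + xs.getD t 0) : Int)
              - (if xs.getD j 0 = xs.getD j 0 + xs.getD t 0 then 1 else 0)
              - (if xs.getD t 0 = xs.getD j 0 + xs.getD t 0 then 1 else 0)
          else 0)).sum := by
    intro j
    apply pv_foldl_body
    intro c t
    rw [PySem.Dict.getD_counter]
    split_ifs <;> ring
  have h1 := pv_foldl_body (List.range xs.length) _ _ (fun c j => h2 j c) 0
  unfold task_58_alt
  rw [PySem.Dict.foldl_insert_getD_add_one_eq_counter, h1, zero_add]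

-- ===== VERDICT (by name: the statement is the Claim_ definition above) =====
theorem task_58_spec : Claim_equal_task_58 := by
  intro xs _
  unfold Spec_task_58
  rw [pv_A_sum, pv_B_sum, pv_sum_comm]
  apply congrArg
  apply List.map_congr_left
  intro j hj
  rw [pv_sum_comm]
  apply congrArg
  apply List.map_congr_left
  intro t ht
  exact pv_inner xs j t (List.mem_range.mp hj) (List.mem_range.mp ht)
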